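-- pv_equiv track=rewrite | github.com/denis-belov/3d-render | src/radiomics/radiomics (1)/model_inference_VB/model_inference_VB.py | make_phase_columns
-- ===== SOURCE A (Python) =====
-- def make_phase_columns(cols, prefix: str):
--     new_cols = {}
--     for c in cols:
--         parts = c.split("_")
--         camel = parts[0] + "".join(
--             (p[:1].upper() + p[1:]) if p else "" for p in parts[1:]
--         )
--         new_cols[c] = prefix + camel
--     return new_cols
-- ===== SOURCE B (Python) =====
-- def make_phase_columns(cols, prefix: str):
--     # Single pass over each column's characters with a capitalize-next flag,
--     # instead of split("_") + join of re-capitalized parts.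
--     new_cols = {}
--     for c in cols:
--         out = []
--         cap = False
--         for ch in c:
--             if ch == "_":
--                 cap = True
--             else:
--                 out.append(ch.upper() if cap else ch)
--                 cap = False
--         new_cols[c] = prefix + "".join(out)
--     return new_cols
-- ===== Notes on version B (the rewrite author's own statement) =====
-- stated objective: alternative
-- what changed: B builds each camelCase name in one character scan with a capitalize-next flag instead of splitting on '_' and rejoining capitalized parts.
import Mathlib
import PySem

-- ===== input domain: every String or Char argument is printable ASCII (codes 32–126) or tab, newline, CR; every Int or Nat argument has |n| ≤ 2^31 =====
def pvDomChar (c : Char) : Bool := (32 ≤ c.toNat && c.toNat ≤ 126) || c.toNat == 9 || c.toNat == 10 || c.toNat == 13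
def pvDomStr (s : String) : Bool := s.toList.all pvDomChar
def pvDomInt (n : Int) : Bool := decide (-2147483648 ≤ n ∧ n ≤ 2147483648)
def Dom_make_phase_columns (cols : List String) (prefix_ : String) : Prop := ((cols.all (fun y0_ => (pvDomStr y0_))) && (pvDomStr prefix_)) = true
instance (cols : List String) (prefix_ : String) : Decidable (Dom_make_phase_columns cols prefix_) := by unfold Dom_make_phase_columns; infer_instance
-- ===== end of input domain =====

-- B builds each camelCase name in one character scan with a capitalize-next flag
-- instead of A's split("_") + join of re-capitalized parts (objective: alternative).

-- ===== PORT A =====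
-- camel name per A: parts = c.split("_"); parts[0] + "".join((p[:1].upper()+p[1:]) if p else "" for p in parts[1:])
def pvCamelA (c : String) : String :=
  let parts := PySem.Chars.splitOn c.toList ['_']
  match parts with
  | [] => ""            -- unreachable: str.split with a nonempty separator never returns an empty list
  | p0 :: rest =>
      String.ofList (p0 ++ PySem.Chars.join [] (rest.map (fun p =>
        if p ≠ [] then
          PySem.Chars.upper (PySem.List.slice p none (some 1)) ++ PySem.List.slice p (some 1) none
        else [])))

def make_phase_columns (cols : List String) (prefix_ : String) : List (String × String) :=
  (cols.foldl (fun (d : PySem.Dict String String) c =>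
      d.insert c (prefix_ ++ pvCamelA c)) PySem.Dict.empty).items

-- ===== PORT B =====
-- camel name per B: one scan over the characters, carrying (output chars, capitalize-next flag)
def pvCamelB (c : String) : String :=
  let st := c.toList.foldl (fun (st : List Char × Bool) ch =>
    if ch = '_' then (st.1, true)
    else (st.1 ++ [if st.2 then PySem.Chars.upperChar ch else ch], false)) ([], false)
  String.ofList st.1

def make_phase_columns_alt (cols : List String) (prefix_ : String) : List (String × String) :=
  (cols.foldl (fun (d : PySem.Dict String String) c =>
      d.insert c (prefix_ ++ pvCamelB c)) PySem.Dict.empty).items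

-- ===== PRECONDITION & SPEC =====
def Spec_make_phase_columns (cols : List String) (prefix_ : String) (out : List (String × String)) : Prop := out = make_phase_columns_alt cols prefix_
instance (cols : List String) (prefix_ : String) (out : List (String × String)) : Decidable (Spec_make_phase_columns cols prefix_ out) := by unfold Spec_make_phase_columns; infer_instance

-- ===== CLAIM (what is proved, stated in full; the proofs are below) =====
def Claim_equal_make_phase_columns : Prop := ∀ (cols : List String) (prefix_ : String), Dom_make_phase_columns cols prefix_ → Spec_make_phase_columns cols prefix_ (make_phase_columns cols prefix_)

-- ===== LEMMAS AND PROOFS =====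

-- reference splitter: split on '_' by structural recursion
def pvSplit : List Char → List (List Char)
  | [] => [[]]
  | c :: rest => if c = '_' then [] :: pvSplit rest
      else ((c :: (pvSplit rest).headD []) :: (pvSplit rest).tail)

lemma pvSplit_ne_nil (cs : List Char) : pvSplit cs ≠ [] := by
  cases cs with
  | nil => simp [pvSplit]
  | cons c rest => simp [pvSplit]; split_ifs <;> simp

lemma pvSplit_go (l : List Char) : ∀ (fuel : Nat) (cur : List Char) (acc : List (List Char)),
    l.length ≤ fuel →
    PySem.Chars.splitOn.go ['_'] fuel l cur acc
      = acc.reverse ++ (cur.reverse ++ (pvSplit l).headD []) :: (pvSplit l).tail := by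
  induction l with
  | nil =>
      intro fuel cur acc _
      cases fuel <;> simp [PySem.Chars.splitOn.go, pvSplit]
  | cons c rest ih =>
      intro fuel cur acc hf
      cases fuel with
      | zero => simp at hf
      | succ fuel' =>
        by_cases hc : c = '_'
        · subst hc
          rw [show PySem.Chars.splitOn.go ['_'] (fuel'+1) ('_' :: rest) cur acc
                = PySem.Chars.splitOn.go ['_'] fuel' rest [] (cur.reverse :: acc) by
              simp [PySem.Chars.splitOn.go, List.isPrefixOf]]
          rw [ih fuel' [] (cur.reverse :: acc) (by simpa using Nat.lt_succ_iff.mp (by simpa using hf))]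
          have h := pvSplit_ne_nil rest
          cases hs : pvSplit rest with
          | nil => exact absurd hs h
          | cons h0 t0 => simp [pvSplit, hs]
        · rw [show PySem.Chars.splitOn.go ['_'] (fuel'+1) (c :: rest) cur acc
                = PySem.Chars.splitOn.go ['_'] fuel' rest (c :: cur) acc by
              simp [PySem.Chars.splitOn.go, List.isPrefixOf, Ne.symm hc]]
          rw [ih fuel' (c :: cur) acc (by simpa using Nat.lt_succ_iff.mp (by simpa using hf))]
          simp [pvSplit, hc]

lemma splitOn_eq_pvSplit (cs : List Char) :
    PySem.Chars.splitOn cs ['_'] = pvSplit cs := by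
  have h := pvSplit_go cs (cs.length + 1) [] [] (by omega)
  rw [PySem.Chars.splitOn, h]
  have hne := pvSplit_ne_nil cs
  cases hs : pvSplit cs with
  | nil => exact absurd hs hne
  | cons h0 t0 => simp

-- per-part capitalization
def pvCap : List Char → List Char
  | [] => []
  | a :: r => PySem.Chars.upperChar a :: r

lemma partA_eq_pvCap (p : List Char) :
    (if p ≠ [] then
        PySem.Chars.upper (PySem.List.slice p none (some 1)) ++ PySem.List.slice p (some 1) none
      else []) = pvCap p := by
  cases p with
  | nil => simp [pvCap]
  | cons a r =>
      simp [pvCap, PySem.List.slice, PySem.Chars.upper]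

lemma join_nil_eq_flatten (ps : List (List Char)) :
    PySem.Chars.join [] ps = ps.flatten := by
  induction ps with
  | nil => simp [PySem.Chars.join, List.intercalate]
  | cons p ps ih =>
      cases ps with
      | nil => simp [PySem.Chars.join, List.intercalate]
      | cons q qs =>
        simp only [PySem.Chars.join, List.intercalate] at *
        simp [List.intersperse] at *
        simpa using ih

-- the B-side scan as a structural recursion
def pvScan : List Char → Bool → List Char
  | [], _ => []
  | ch :: rest, cap =>
      if ch = '_' then pvScan rest true
      else (if cap then PySem.Chars.upperChar ch else ch) :: pvScan rest false

lemma foldl_eq_pvScan (cs : List Char) : ∀ (acc : List Char) (cap : Bool),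
    (cs.foldl (fun (st : List Char × Bool) ch =>
      if ch = '_' then (st.1, true)
      else (st.1 ++ [if st.2 then PySem.Chars.upperChar ch else ch], false)) (acc, cap)).1
      = acc ++ pvScan cs cap := by
  induction cs with
  | nil => intro acc cap; simp [pvScan]
  | cons ch rest ih =>
      intro acc cap
      by_cases hc : ch = '_'
      · simp [List.foldl, hc, pvScan, ih]
      · simp [List.foldl, hc, pvScan, ih]

-- the scan computes capitalized-parts-of-split
lemma pvScan_split (cs : List Char) :
    pvScan cs false = (pvSplit cs).headD [] ++ ((pvSplit cs).tail.map pvCap).flatten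
    ∧ pvScan cs true = pvCap ((pvSplit cs).headD []) ++ ((pvSplit cs).tail.map pvCap).flatten := by
  induction cs with
  | nil => simp [pvScan, pvSplit, pvCap]
  | cons c rest ih =>
      by_cases hc : c = '_'
      · subst hc
        have hne := pvSplit_ne_nil rest
        cases hs : pvSplit rest with
        | nil => exact absurd hs hne
        | cons h0 t0 =>
          rw [hs] at ih
          refine ⟨?_, ?_⟩ <;> simp [pvScan, pvSplit, hs, ih.2, pvCap]
      · have hne := pvSplit_ne_nil rest
        cases hs : pvSplit rest with
        | nil => exact absurd hs hne
        | cons h0 t0 =>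
          rw [hs] at ih
          constructor
          · simp [pvScan, pvSplit, hc, hs, ih.1]
          · simp [pvScan, pvSplit, hc, hs, pvCap, ih.1]

lemma camelA_eq_camelB (c : String) : pvCamelA c = pvCamelB c := by
  unfold pvCamelA pvCamelB
  rw [splitOn_eq_pvSplit]
  have hne := pvSplit_ne_nil c.toList
  cases hs : pvSplit c.toList with
  | nil => exact absurd hs hne
  | cons h0 t0 =>
    simp only [foldl_eq_pvScan c.toList [] false, List.nil_append]
    have := (pvScan_split c.toList).1
    rw [hs] at this
    simp only [List.headD_cons, List.tail_cons] at this
    rw [this]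
    congr 1
    rw [join_nil_eq_flatten]
    exact congrArg (h0 ++ ·) (congrArg List.flatten (List.map_congr_left (fun p _ => partA_eq_pvCap p)))

-- ===== VERDICT (by name: the statement is the Claim_ definition above) =====
theorem make_phase_columns_spec : Claim_equal_make_phase_columns := by
  intro cols prefix_ _
  unfold Spec_make_phase_columns make_phase_columns make_phase_columns_alt
  congr 2
  funext d c
  rw [camelA_eq_camelB]
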